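-- pv_equiv track=rewrite | github.com/FORGIVEUSJONATHAN/15112ProjectZhijie | setting.py | getQura
-- ===== SOURCE A (Python) =====
-- def getQura(numList):
--     qura = []
--     listCopy = numList[:]
--     for i in numList:
--         if listCopy.count(i) == 4:
--             qura.append(i)
--             while i in listCopy:
--                 listCopy.remove(i) # tList1 No Qura
--     return qura
-- ===== SOURCE B (Python) =====
-- def getQura(numList):
--     counts = {}
--     for i in numList:
--         counts[i] = counts.get(i, 0) + 1
--     return [k for k, c in counts.items() if c == 4]
-- ===== Notes on version B (the rewrite author's own statement) =====
-- stated objective: simpler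
-- what changed: Replaced the per-element listCopy.count rescans and the while-remove dedup loop with a single counting-dict build followed by one pass over the distinct keys (dict insertion order = first-appearance order).
import Mathlib
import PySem

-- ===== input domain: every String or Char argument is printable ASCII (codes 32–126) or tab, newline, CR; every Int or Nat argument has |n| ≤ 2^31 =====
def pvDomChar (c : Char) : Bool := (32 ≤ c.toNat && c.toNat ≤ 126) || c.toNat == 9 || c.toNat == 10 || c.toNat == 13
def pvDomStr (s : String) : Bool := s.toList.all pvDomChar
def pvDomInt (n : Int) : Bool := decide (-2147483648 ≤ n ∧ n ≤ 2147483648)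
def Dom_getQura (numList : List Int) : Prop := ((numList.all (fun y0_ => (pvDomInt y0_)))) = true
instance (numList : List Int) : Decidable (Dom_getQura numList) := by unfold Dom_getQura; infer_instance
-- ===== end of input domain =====

-- B replaces A's per-element listCopy.count rescans and while-remove dedup loop with one
-- counting-dict build plus a single pass over the distinct keys (simpler, one aggregate pass).


-- ===== PORT A =====
-- 'while i in listCopy: listCopy.remove(i)' — remove the first occurrence while present
def pyRemoveLoop (l : List Int) (i : Int) : List Int :=
  if h : i ∈ l then pyRemoveLoop (l.erase i) i else l
termination_by l.length
decreasing_by exact List.length_erase_of_mem h ▸ Nat.sub_lt (List.length_pos_of_mem h) one_pos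

def getQura (numList : List Int) : List Int :=
  (numList.foldl
    (fun (st : List Int × List Int) i =>
      if st.2.count i = 4 then (st.1 ++ [i], pyRemoveLoop st.2 i) else st)
    ([], numList)).1

-- ===== PORT B =====
def getQura_alt (numList : List Int) : List Int :=
  ((numList.foldl (fun d i => d.insert i (d.getD i 0 + 1))
      (PySem.Dict.empty : PySem.Dict Int Int)).items.filter
    (fun p => p.2 == 4)).map (fun p => p.1)

-- ===== PRECONDITION & SPEC =====
def Spec_getQura (numList : List Int) (out : List Int) : Prop := out = getQura_alt numList
instance (numList : List Int) (out : List Int) : Decidable (Spec_getQura numList out) := by unfold Spec_getQura; infer_instance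

-- ===== CLAIM (what is proved, stated in full; the proofs are below) =====
def Claim_equal_getQura : Prop := ∀ (numList : List Int), Dom_getQura numList → Spec_getQura numList (getQura numList)

-- ===== LEMMAS AND PROOFS =====

theorem filter_ne_erase (l : List Int) (i : Int) :
    (l.erase i).filter (fun x => decide (x ≠ i)) = l.filter (fun x => decide (x ≠ i)) := by
  induction l with
  | nil => rfl
  | cons a l ih =>
      by_cases ha : a = i
      · subst ha; simp [List.erase_cons_head]
      · rw [List.erase_cons_tail (by simpa using ha)]
        simp only [List.filter_cons, ih]

-- removing the first occurrence while present = removing every occurrence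
theorem pyRemoveLoop_eq_filter (l : List Int) (i : Int) :
    pyRemoveLoop l i = l.filter (fun x => decide (x ≠ i)) := by
  fun_induction pyRemoveLoop l i with
  | case1 l h ih => rw [ih, filter_ne_erase]
  | case2 l h =>
      symm; apply List.filter_eq_self.2
      intro x hx; simp; rintro rfl; exact h hx

theorem count_filter_not_mem_removed (full q : List Int) (i : Int) :
    (full.filter (fun x => !q.contains x)).count i
      = if i ∈ q then 0 else full.count i := by
  by_cases h : i ∈ q
  · rw [if_pos h, List.count_eq_zero]
    intro hmem; exact absurd (List.mem_filter.1 hmem).2 (by simp [h])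
  · rw [if_neg h, List.count_filter]
    simp [h]

-- A's loop with the evolving copy = the membership-guarded accumulator loop
theorem A_loop_eq (full : List Int) (s q : List Int) :
    (s.foldl
      (fun (st : List Int × List Int) i =>
        if st.2.count i = 4 then (st.1 ++ [i], pyRemoveLoop st.2 i) else st)
      (q, full.filter (fun x => !q.contains x))).1
    = s.foldl
        (fun q i => if full.count i = 4 ∧ i ∉ q then q ++ [i] else q) q := by
  induction s generalizing q with
  | nil => rfl
  | cons i s ih =>
      simp only [List.foldl_cons]
      by_cases hc : (full.filter (fun x => !q.contains x)).count i = 4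
      · have hq : i ∉ q ∧ full.count i = 4 := by
          rw [count_filter_not_mem_removed] at hc
          by_cases h : i ∈ q
          · simp [h] at hc
          · exact ⟨h, by simpa [h] using hc⟩
        rw [if_pos hc, if_pos ⟨hq.2, hq.1⟩]
        have hcopy : pyRemoveLoop (full.filter (fun x => !q.contains x)) i
            = full.filter (fun x => !(q ++ [i]).contains x) := by
          rw [pyRemoveLoop_eq_filter, List.filter_filter]
          apply List.filter_congr
          intro x _
          by_cases hx : x = i <;> by_cases hxq : x ∈ q <;> simp [hx, hxq]
        rw [hcopy]
        exact ih (q ++ [i])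
      · have hq : ¬ (full.count i = 4 ∧ i ∉ q) := by
          rw [count_filter_not_mem_removed] at hc
          rintro ⟨h4, hnq⟩; simp [hnq, h4] at hc
        rw [if_neg hc, if_neg hq]
        exact ih q

-- the guarded accumulator loop is Set.update with the filtered list
theorem guarded_loop_eq_update (p : Int → Prop) [DecidablePred p] (s q : List Int) :
    s.foldl (fun q i => if p i ∧ i ∉ q then q ++ [i] else q) q
      = PySem.Set.update q (s.filter (fun i => decide (p i))) := by
  induction s generalizing q with
  | nil => rfl
  | cons i s ih =>
      by_cases hp : p i
      · rw [List.filter_cons, if_pos (by simp [hp]), PySem.Set.update_cons,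
          PySem.Set.add_eq_ite, List.foldl_cons]
        by_cases hm : i ∈ q
        · rw [if_neg (show ¬(p i ∧ i ∉ q) by simp [hm]), if_pos hm]; exact ih q
        · rw [if_pos (show p i ∧ i ∉ q from ⟨hp, hm⟩), if_neg hm]; exact ih (q ++ [i])
      · simp only [List.foldl_cons, List.filter_cons, hp, decide_false,
          Bool.false_eq_true, if_false]
        rw [if_neg (by tauto)]
        exact ih q

-- Set.ofList commutes with filter
theorem ofList_filter (p : Int → Bool) (l : List Int) :
    PySem.Set.ofList (l.filter p) = (PySem.Set.ofList l).filter p := by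
  induction l using List.reverseRecOn with
  | nil => rfl
  | append_singleton l x ih =>
      rw [List.filter_append, PySem.Set.ofList_append_singleton]
      by_cases hp : p x
      · rw [show List.filter p [x] = [x] from by simp [hp],
            PySem.Set.ofList_append_singleton, ih]
        by_cases hm : x ∈ PySem.Set.ofList l
        · rw [PySem.Set.add_of_mem hm,
              PySem.Set.add_of_mem (by simp [List.mem_filter, hm, hp])]
        · rw [PySem.Set.add_of_not_mem hm,
              PySem.Set.add_of_not_mem (fun hx => hm (List.mem_filter.1 hx).1),
              List.filter_append, show List.filter p [x] = [x] from by simp [hp]]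
      · rw [show List.filter p [x] = [] from by simp [hp], List.append_nil, ih]
        by_cases hm : x ∈ PySem.Set.ofList l
        · rw [PySem.Set.add_of_mem hm]
        · rw [PySem.Set.add_of_not_mem hm, List.filter_append,
              show List.filter p [x] = [] from by simp [hp], List.append_nil]

theorem getQura_eq_canonical (numList : List Int) :
    getQura numList
      = (PySem.Set.ofList numList).filter (fun k => numList.count k == 4) := by
  have h := A_loop_eq numList numList []
  rw [show numList.filter (fun x => !([] : List Int).contains x) = numList from by simp] at h
  unfold getQura
  rw [h, guarded_loop_eq_update (fun i => numList.count i = 4) numList []]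
  rw [PySem.Set.update_nil_left, ofList_filter]
  apply List.filter_congr
  intro x _
  rw [Bool.eq_iff_iff]
  simp [beq_iff_eq]

theorem getQura_alt_eq_canonical (numList : List Int) :
    getQura_alt numList
      = (PySem.Set.ofList numList).filter (fun k => numList.count k == 4) := by
  unfold getQura_alt
  rw [PySem.Dict.foldl_insert_getD_add_one_eq_counter, PySem.Dict.items_counter,
    List.filter_map, List.map_map]
  simp only [Function.comp_def]
  rw [List.map_id']
  apply List.filter_congr
  intro x _
  rw [Bool.eq_iff_iff]
  simp only [beq_iff_eq]
  omega

-- ===== VERDICT (by name: the statement is the Claim_ definition above) =====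
theorem getQura_spec : Claim_equal_getQura := by
  intro numList _
  unfold Spec_getQura
  rw [getQura_eq_canonical, getQura_alt_eq_canonical]
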